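-- pv_equiv track=rewrite | github.com/seijasdz/PerKalk | full_predictor_tester.py | get_complete_cuts
-- ===== SOURCE A (Python) =====
-- def get_complete_cuts(divs, before, after, complement=False):
--     new_divs = []
--     for i, div in enumerate(divs):
--         if i > 0:
--             if not complement:
--                 intron = (divs[i - 1][1], div[0])
--             else:
--                 intron = (div[1], divs[i - 1][0])
--             new_divs.append((intron, 'n'))
--         new_divs.append((div, 'a'))
--     if not complement:
--         new_divs.insert(0, ((divs[0][0] - before, divs[0][0]), 'b'))
--         new_divs.append(((divs[-1][1], divs[-1][1] + after), 'f'))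
--     else:
--         new_divs.insert(0, ((divs[0][1], divs[0][1] + before), 'b'))
--         new_divs.append(((divs[-1][0] - after, divs[-1][0]), 'f'))
--     return new_divs
-- ===== SOURCE B (Python) =====
-- def get_complete_cuts(divs, before, after, complement=False):
--     n = len(divs)
--
--     def entry(k):
--         if k == 0:
--             if not complement:
--                 return ((divs[0][0] - before, divs[0][0]), 'b')
--             return ((divs[0][1], divs[0][1] + before), 'b')
--         if k == 2 * n:
--             if not complement:
--                 return ((divs[-1][1], divs[-1][1] + after), 'f')
--             return ((divs[-1][0] - after, divs[-1][0]), 'f')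
--         if k % 2 == 1:
--             return (divs[(k - 1) // 2], 'a')
--         p = divs[k // 2 - 1]
--         c = divs[k // 2]
--         if not complement:
--             return ((p[1], c[0]), 'n')
--         return ((c[1], p[0]), 'n')
--
--     return [entry(k) for k in range(2 * n + 1)]
-- ===== Notes on version B (the rewrite author's own statement) =====
-- stated objective: alternative
-- what changed: Replaces A's sequential interleaving loop (enumerate, append of intron then exon, insert(0)/append for the boundaries) by a closed-form indexed table: element k of the output is computed directly from k by parity and index arithmetic over range(2*len(divs)+1), with no sequential state at all.
-- outside the precondition, e.g. on get_complete_cuts([], 1, 1, False): A raises IndexError, B raises IndexError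
import Mathlib
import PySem

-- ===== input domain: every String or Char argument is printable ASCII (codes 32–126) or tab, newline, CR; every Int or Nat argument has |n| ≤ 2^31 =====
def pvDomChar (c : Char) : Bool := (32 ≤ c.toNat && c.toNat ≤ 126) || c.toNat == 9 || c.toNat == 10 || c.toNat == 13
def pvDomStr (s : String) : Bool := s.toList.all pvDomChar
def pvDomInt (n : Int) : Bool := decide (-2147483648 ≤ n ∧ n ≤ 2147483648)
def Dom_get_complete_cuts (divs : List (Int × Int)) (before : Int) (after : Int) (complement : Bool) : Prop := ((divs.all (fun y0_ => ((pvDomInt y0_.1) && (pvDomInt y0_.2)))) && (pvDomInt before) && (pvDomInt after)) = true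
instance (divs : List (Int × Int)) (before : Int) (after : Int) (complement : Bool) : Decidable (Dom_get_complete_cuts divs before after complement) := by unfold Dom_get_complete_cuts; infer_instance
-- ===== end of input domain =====

-- B computes output element k directly from its index (a closed-form table over range(2n+1),
-- decided by parity and index arithmetic) instead of A's sequential interleaving loop; objective: alternative.

-- ===== PORT A =====
def get_complete_cuts (divs : List (Int × Int)) (before : Int) (after : Int) (complement : Bool) : List ((Int × Int) × String) :=
  let new_divs := (PySem.List.enumerate divs 0).foldl
    (fun (acc : List ((Int × Int) × String)) (p : Int × (Int × Int)) =>
      let acc := if p.1 > 0 then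
          let intron := if !complement then
              ((PySem.List.pyGetD divs (p.1 - 1) ((0 : Int), (0 : Int))).2, p.2.1)
            else
              (p.2.2, (PySem.List.pyGetD divs (p.1 - 1) ((0 : Int), (0 : Int))).1)
          acc ++ [(intron, "n")]
        else acc
      acc ++ [(p.2, "a")]) []
  if !complement then
    (((PySem.List.pyGetD divs 0 ((0 : Int), (0 : Int))).1 - before,
      (PySem.List.pyGetD divs 0 ((0 : Int), (0 : Int))).1), "b") ::
      (new_divs ++ [(((PySem.List.pyGetD divs (-1) ((0 : Int), (0 : Int))).2,
        (PySem.List.pyGetD divs (-1) ((0 : Int), (0 : Int))).2 + after), "f")])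
  else
    (((PySem.List.pyGetD divs 0 ((0 : Int), (0 : Int))).2,
      (PySem.List.pyGetD divs 0 ((0 : Int), (0 : Int))).2 + before), "b") ::
      (new_divs ++ [(((PySem.List.pyGetD divs (-1) ((0 : Int), (0 : Int))).1 - after,
        (PySem.List.pyGetD divs (-1) ((0 : Int), (0 : Int))).1), "f")])

-- ===== PORT B =====
-- B-side helper: the closed-form entry function (Python's inner `entry(k)`).
def pvEntryB (divs : List (Int × Int)) (before : Int) (after : Int) (complement : Bool) (k : Int) : (Int × Int) × String :=
  if k = 0 then
    if !complement then
      (((PySem.List.pyGetD divs 0 ((0 : Int), (0 : Int))).1 - before,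
        (PySem.List.pyGetD divs 0 ((0 : Int), (0 : Int))).1), "b")
    else
      (((PySem.List.pyGetD divs 0 ((0 : Int), (0 : Int))).2,
        (PySem.List.pyGetD divs 0 ((0 : Int), (0 : Int))).2 + before), "b")
  else if k = 2 * (divs.length : Int) then
    if !complement then
      (((PySem.List.pyGetD divs (-1) ((0 : Int), (0 : Int))).2,
        (PySem.List.pyGetD divs (-1) ((0 : Int), (0 : Int))).2 + after), "f")
    else
      (((PySem.List.pyGetD divs (-1) ((0 : Int), (0 : Int))).1 - after,
        (PySem.List.pyGetD divs (-1) ((0 : Int), (0 : Int))).1), "f")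
  else if PySem.Int.mod k 2 = 1 then
    (PySem.List.pyGetD divs (PySem.Int.floordiv (k - 1) 2) ((0 : Int), (0 : Int)), "a")
  else
    let p := PySem.List.pyGetD divs (PySem.Int.floordiv k 2 - 1) ((0 : Int), (0 : Int))
    let c := PySem.List.pyGetD divs (PySem.Int.floordiv k 2) ((0 : Int), (0 : Int))
    if !complement then ((p.2, c.1), "n") else ((c.2, p.1), "n")

def get_complete_cuts_alt (divs : List (Int × Int)) (before : Int) (after : Int) (complement : Bool) : List ((Int × Int) × String) :=
  (PySem.List.pyRange 0 (2 * (divs.length : Int) + 1) 1).map (pvEntryB divs before after complement)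

-- ===== PRECONDITION & SPEC =====
-- Pre_ excludes only the empty list, where A raises IndexError (divs[0]).
def Pre_get_complete_cuts (divs : List (Int × Int)) (before : Int) (after : Int) (complement : Bool) : Prop := divs ≠ []
instance (divs : List (Int × Int)) (before : Int) (after : Int) (complement : Bool) : Decidable (Pre_get_complete_cuts divs before after complement) := by unfold Pre_get_complete_cuts; infer_instance
def pvWitness_get_complete_cuts : (List (Int × Int)) × Int × Int × Bool := ([(1, 2), (5, 7)], 3, 4, true)
def Spec_get_complete_cuts (divs : List (Int × Int)) (before : Int) (after : Int) (complement : Bool) (out : List ((Int × Int) × String)) : Prop := out = get_complete_cuts_alt divs before after complement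
instance (divs : List (Int × Int)) (before : Int) (after : Int) (complement : Bool) (out : List ((Int × Int) × String)) : Decidable (Spec_get_complete_cuts divs before after complement out) := by unfold Spec_get_complete_cuts; infer_instance

-- ===== CLAIM (what is proved, stated in full; the proofs are below) =====
def Claim_equal_get_complete_cuts : Prop := ∀ (divs : List (Int × Int)) (before : Int) (after : Int) (complement : Bool), Dom_get_complete_cuts divs before after complement → Pre_get_complete_cuts divs before after complement → Spec_get_complete_cuts divs before after complement (get_complete_cuts divs before after complement)

-- ===== LEMMAS AND PROOFS =====

def pvIntron (c : Bool) (p q : Int × Int) : Int × Int := if c then (q.2, p.1) else (p.2, q.1)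

def pvCore (c : Bool) : (Int × Int) → List (Int × Int) → List ((Int × Int) × String)
  | _, [] => []
  | prev, d :: t => (pvIntron c prev d, "n") :: (d, "a") :: pvCore c d t

theorem pvGetD_append_last (pre : List (Int × Int)) (l : List (Int × Int)) (h : pre ≠ []) (d : Int × Int) :
    (pre ++ l).getD (pre.length - 1) d = pre.getLast h := by
  have hlt : pre.length - 1 < pre.length := by
    have := List.length_pos_iff.mpr h; omega
  rw [List.getD_eq_getElem?_getD, List.getElem?_append_left hlt,
    List.getElem?_eq_getElem hlt, List.getLast_eq_getElem]
  simp

theorem pvFoldA (c : Bool) (tail : List (Int × Int)) : ∀ (pre : List (Int × Int)) (acc : List ((Int × Int) × String)) (h : pre ≠ []),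
    (PySem.List.enumerate tail (pre.length : Int)).foldl
      (fun (acc : List ((Int × Int) × String)) (p : Int × (Int × Int)) =>
        (if p.1 > 0 then
          acc ++ [((if !c then
              ((PySem.List.pyGetD (pre ++ tail) (p.1 - 1) ((0 : Int), (0 : Int))).2, p.2.1)
            else
              (p.2.2, (PySem.List.pyGetD (pre ++ tail) (p.1 - 1) ((0 : Int), (0 : Int))).1)), "n")]
        else acc) ++ [(p.2, "a")]) acc
    = acc ++ pvCore c (pre.getLast h) tail := by
  induction tail with
  | nil => intro pre acc h; simp [PySem.List.enumerate, pvCore]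
  | cons d t ih =>
    intro pre acc h
    rw [PySem.List.enumerate_cons, List.foldl_cons]
    have hpos : ((pre.length : Int) > 0) := by
      have := List.length_pos_iff.mpr h; exact_mod_cast this
    have hidx : (pre.length : Int) - 1 = ((pre.length - 1 : Nat) : Int) := by
      have := List.length_pos_iff.mpr h; omega
    have hget : PySem.List.pyGetD (pre ++ d :: t) ((pre.length : Int) - 1) ((0 : Int), (0 : Int)) = pre.getLast h := by
      rw [hidx, PySem.List.pyGetD_natCast, pvGetD_append_last pre (d :: t) h]
    have hbody : ∀ (p : Int × (Int × Int)), PySem.List.pyGetD (pre ++ d :: t) (p.1 - 1) ((0 : Int), (0 : Int)) = PySem.List.pyGetD ((pre ++ [d]) ++ t) (p.1 - 1) ((0 : Int), (0 : Int)) := by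
      intro p; rw [List.append_assoc]; rfl
    simp only [hpos, if_pos, hget]
    have hL : pre ++ d :: t = (pre ++ [d]) ++ t := by simp
    have hs : (pre.length : Int) + 1 = (((pre ++ [d]).length : Nat) : Int) := by
      simp
    rw [hL, hs, ih (pre ++ [d]) _ (by simp)]
    have hprev : pvIntron c (pre.getLast h) d = (if !c then ((pre.getLast h).2, d.1) else (d.2, (pre.getLast h).1)) := by
      cases c <;> simp [pvIntron]
    simp [pvCore, hprev]

-- B-side evaluation lemmas for pvEntryB at the middle/boundary indices.

theorem pvEntryB_odd (divs : List (Int × Int)) (before after : Int) (c : Bool) (k : Nat)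
    (h1 : 0 < k) (h2 : k < 2 * divs.length) (hodd : k % 2 = 1) :
    pvEntryB divs before after c (k : Int) = (divs.getD ((k - 1) / 2) ((0 : Int), (0 : Int)), "a") := by
  have hk0 : ((k : Int)) ≠ 0 := by exact_mod_cast Nat.pos_iff_ne_zero.mp h1
  have hkn : ((k : Int)) ≠ 2 * (divs.length : Int) := by intro h; omega
  have hmod : PySem.Int.mod (k : Int) 2 = 1 := by
    have h := PySem.Int.mod_natCast k 2
    have h2' : PySem.Int.mod (k : Int) 2 = ((k % 2 : Nat) : Int) := by exact_mod_cast h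
    rw [h2', hodd]; rfl
  have hsub : ((k : Int)) - 1 = ((k - 1 : Nat) : Int) := by omega
  have hdiv : PySem.Int.floordiv ((k - 1 : Nat) : Int) 2 = (((k - 1) / 2 : Nat) : Int) := by
    exact_mod_cast PySem.Int.floordiv_natCast (k - 1) 2
  rw [pvEntryB, if_neg hk0, if_neg hkn, if_pos hmod, hsub, hdiv, PySem.List.pyGetD_natCast]

theorem pvEntryB_even (divs : List (Int × Int)) (before after : Int) (c : Bool) (k : Nat)
    (h1 : 0 < k) (h2 : k < 2 * divs.length) (heven : k % 2 = 0) :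
    pvEntryB divs before after c (k : Int) =
      (pvIntron c (divs.getD (k / 2 - 1) ((0 : Int), (0 : Int))) (divs.getD (k / 2) ((0 : Int), (0 : Int))), "n") := by
  have hk0 : ((k : Int)) ≠ 0 := by exact_mod_cast Nat.pos_iff_ne_zero.mp h1
  have hkn : ((k : Int)) ≠ 2 * (divs.length : Int) := by intro h; omega
  have hmod : PySem.Int.mod (k : Int) 2 ≠ 1 := by
    have h := PySem.Int.mod_natCast k 2
    have h2' : PySem.Int.mod (k : Int) 2 = ((k % 2 : Nat) : Int) := by exact_mod_cast h
    rw [h2', heven]; decide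
  have hdiv : PySem.Int.floordiv (k : Int) 2 = ((k / 2 : Nat) : Int) := by
    exact_mod_cast PySem.Int.floordiv_natCast k 2
  have hsub : ((k / 2 : Nat) : Int) - 1 = ((k / 2 - 1 : Nat) : Int) := by
    have : 1 ≤ k / 2 := by omega
    omega
  rw [pvEntryB, if_neg hk0, if_neg hkn, if_neg hmod, hdiv, hsub,
    PySem.List.pyGetD_natCast, PySem.List.pyGetD_natCast]
  cases c <;> simp [pvIntron]

theorem pvDropGetD (divs : List (Int × Int)) (i : Nat) (x : Int × Int) (t : List (Int × Int))
    (h : divs.drop i = x :: t) : divs.getD i ((0 : Int), (0 : Int)) = x := by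
  have : divs[i]? = some x := by
    have h0 : (divs.drop i)[0]? = some x := by rw [h]; rfl
    rw [List.getElem?_drop] at h0; simpa using h0
  simp [List.getD_eq_getElem?_getD, this]

-- The middle of B's table (indices 2i+1 … 2n-1) equals the exon/intron core.
theorem pvMidB (divs : List (Int × Int)) (before after : Int) (c : Bool) :
    ∀ (t : List (Int × Int)) (i : Nat) (prev : Int × Int),
      divs.drop i = prev :: t → divs.length = i + 1 + t.length →
      (List.range' (2 * i + 1) (2 * t.length + 1)).map (fun k : Nat => pvEntryB divs before after c (k : Int))
        = (prev, "a") :: pvCore c prev t := by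
  intro t
  induction t with
  | nil =>
    intro i prev h hlen
    have hlenn : divs.length = i + 1 := by simpa using hlen
    rw [show 2 * ([] : List (Int × Int)).length + 1 = 1 from rfl,
      show List.range' (2 * i + 1) 1 = [2 * i + 1] from by simp]
    simp only [List.map_cons, List.map_nil]
    rw [pvEntryB_odd divs before after c (2 * i + 1) (by omega) (by omega) (by omega)]
    rw [show (2 * i + 1 - 1) / 2 = i from by omega, pvDropGetD divs i prev [] h]
    rfl
  | cons d t ih =>
    intro i prev h hlen
    have hlenn : divs.length = i + 1 + (t.length + 1) := by simpa using hlen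
    have hdrop' : divs.drop (i + 1) = d :: t := by
      rw [← List.tail_drop, h]; rfl
    rw [show 2 * (d :: t).length + 1 = ((2 * t.length + 1) + 1) + 1 from by simp; omega,
      List.range'_succ, List.range'_succ, List.map_cons, List.map_cons]
    rw [pvEntryB_odd divs before after c (2 * i + 1) (by omega) (by omega) (by omega)]
    rw [pvEntryB_even divs before after c (2 * i + 1 + 1) (by omega) (by omega) (by omega)]
    rw [show (2 * i + 1 - 1) / 2 = i from by omega,
      show (2 * i + 1 + 1) / 2 - 1 = i from by omega,
      show (2 * i + 1 + 1) / 2 = i + 1 from by omega,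
      pvDropGetD divs i prev (d :: t) h, pvDropGetD divs (i + 1) d t hdrop']
    rw [show 2 * i + 1 + 1 + 1 = 2 * (i + 1) + 1 from by omega,
      ih (i + 1) d hdrop' (by omega)]
    rfl

-- B's table in normal form: head :: exon/intron core :: tail.
theorem pvAltNormal (divs : List (Int × Int)) (before after : Int) (c : Bool) :
    ∀ (d0 : Int × Int) (rest : List (Int × Int)), divs = d0 :: rest →
    get_complete_cuts_alt divs before after c =
      pvEntryB divs before after c 0 :: ((d0, "a") :: pvCore c d0 rest)
        ++ [pvEntryB divs before after c (2 * (divs.length : Int))] := by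
  intro d0 rest hd
  have hn : divs.length = rest.length + 1 := by rw [hd]; simp
  unfold get_complete_cuts_alt
  rw [PySem.List.pyRange_one]
  rw [show (2 * ((divs.length : Nat) : Int) + 1 - 0).toNat = 2 * divs.length + 1 from by omega]
  rw [List.map_map]
  have hcomp : (pvEntryB divs before after c ∘ fun k : Nat => (0 : Int) + (k : Int))
      = fun k : Nat => pvEntryB divs before after c (k : Int) := by
    funext k; simp
  rw [hcomp, List.range_eq_range']
  rw [show 2 * divs.length + 1 = (2 * rest.length + 2) + 1 from by omega, List.range'_succ]
  rw [show List.range' (0 + 1) (2 * rest.length + 2) = List.range' 1 (2 * rest.length + 1) ++ [1 + (2 * rest.length + 1)] from by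
    rw [show 2 * rest.length + 2 = (2 * rest.length + 1) + 1 from by omega, List.range'_concat]
    norm_num]
  rw [List.map_cons, List.map_append, List.map_singleton]
  have hmid := pvMidB divs before after c rest 0 d0 (by simp [hd]) (by omega)
  norm_num at hmid
  rw [hmid]
  have htail : ((1 + (2 * rest.length + 1) : Nat) : Int) = 2 * (divs.length : Int) := by
    rw [hn]; push_cast; ring
  rw [htail]
  norm_num

theorem get_complete_cuts_eq_alt (divs : List (Int × Int)) (before after : Int) (c : Bool) (h : divs ≠ []) :
    get_complete_cuts divs before after c = get_complete_cuts_alt divs before after c := by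
  obtain ⟨d0, rest, rfl⟩ := List.exists_cons_of_ne_nil h
  have h1 : ([d0] : List (Int × Int)) ≠ [] := by simp
  have hA := pvFoldA c rest [d0] [(d0, "a")] h1
  simp only [List.singleton_append, List.length_cons, List.length_nil, Nat.zero_add,
    Nat.cast_one, List.getLast_singleton] at hA
  have hn0 : pvEntryB (d0 :: rest) before after c 0 =
      (if !c then
        (((PySem.List.pyGetD (d0 :: rest) 0 ((0 : Int), (0 : Int))).1 - before,
          (PySem.List.pyGetD (d0 :: rest) 0 ((0 : Int), (0 : Int))).1), "b")
      else
        (((PySem.List.pyGetD (d0 :: rest) 0 ((0 : Int), (0 : Int))).2,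
          (PySem.List.pyGetD (d0 :: rest) 0 ((0 : Int), (0 : Int))).2 + before), "b")) := by
    rw [pvEntryB, if_pos rfl]
  have hnT : pvEntryB (d0 :: rest) before after c (2 * (((d0 :: rest).length : Nat) : Int)) =
      (if !c then
        (((PySem.List.pyGetD (d0 :: rest) (-1) ((0 : Int), (0 : Int))).2,
          (PySem.List.pyGetD (d0 :: rest) (-1) ((0 : Int), (0 : Int))).2 + after), "f")
      else
        (((PySem.List.pyGetD (d0 :: rest) (-1) ((0 : Int), (0 : Int))).1 - after,
          (PySem.List.pyGetD (d0 :: rest) (-1) ((0 : Int), (0 : Int))).1), "f")) := by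
    have hne : (2 * (((d0 :: rest).length : Nat) : Int)) ≠ 0 := by simp; omega
    rw [pvEntryB, if_neg hne, if_pos rfl]
  rw [pvAltNormal (d0 :: rest) before after c d0 rest rfl, hn0, hnT]
  cases c with
  | false =>
    simp only [Bool.not_false, if_pos] at hA ⊢
    simp only [get_complete_cuts]
    norm_num at hA ⊢
    rw [hA]; simp
  | true =>
    simp only [Bool.not_true, Bool.false_eq_true, if_false] at hA ⊢
    simp only [get_complete_cuts]
    norm_num at hA ⊢
    rw [hA]; simp

-- ===== VERDICT (by name: the statement is the Claim_ definition above) =====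
theorem get_complete_cuts_spec : Claim_equal_get_complete_cuts := by
  intro divs before after complement _ hpre
  exact get_complete_cuts_eq_alt divs before after complement hpre
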